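-- pv_equiv track=rewrite | github.com/yeonggyeong/TIL | Algorithms/swea/1221_GNS/solution.py | solution
-- ===== SOURCE A (Python) =====
-- def solution(numbers):
--     num_dict = {'ZRO': 0, 'ONE': 0, 'TWO': 0, 'THR': 0, 'FOR': 0, 'FIV': 0, 'SIX': 0, 'SVN': 0, 'EGT': 0, 'NIN': 0}
--
--     for number in numbers:
--         num_dict[number] = num_dict[number]+1
--
--     new_numbers = []
--     for k, v in num_dict.items():
--         if v != 0:
--             for _ in range(v):
--                 new_numbers.append(k)
--
--     answer = ' '.join(new_numbers)
--     return answer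
-- ===== SOURCE B (Python) =====
-- def solution(numbers):
--     order = {'ZRO': 0, 'ONE': 1, 'TWO': 2, 'THR': 3, 'FOR': 4,
--              'FIV': 5, 'SIX': 6, 'SVN': 7, 'EGT': 8, 'NIN': 9}
--     return ' '.join(sorted(numbers, key=lambda w: order[w]))
-- ===== Notes on version B (the rewrite author's own statement) =====
-- stated objective: idiomatic
-- what changed: Replaces A's counting pass plus reconstruction from a counter dict by directly sorting the words with a fixed rank table as sort key.
import Mathlib
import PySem

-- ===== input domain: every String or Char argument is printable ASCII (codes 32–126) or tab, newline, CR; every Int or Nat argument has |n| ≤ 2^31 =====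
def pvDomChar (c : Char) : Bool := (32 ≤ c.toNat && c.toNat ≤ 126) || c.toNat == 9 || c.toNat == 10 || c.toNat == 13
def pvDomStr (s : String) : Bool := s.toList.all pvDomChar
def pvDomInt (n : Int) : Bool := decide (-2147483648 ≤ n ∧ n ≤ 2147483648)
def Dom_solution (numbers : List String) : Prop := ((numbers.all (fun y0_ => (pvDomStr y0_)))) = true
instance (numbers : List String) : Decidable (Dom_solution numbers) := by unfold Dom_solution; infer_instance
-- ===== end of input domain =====

-- B sorts the words directly with a fixed rank table as sort key instead of A's counting pass + reconstruction from a counter dict.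


-- ===== PORT A =====
def solution (numbers : List String) : String :=
  -- num_dict = {'ZRO': 0, …, 'NIN': 0}
  let numDict : PySem.Dict String Int := PySem.Dict.ofList
    [("ZRO", 0), ("ONE", 0), ("TWO", 0), ("THR", 0), ("FOR", 0),
     ("FIV", 0), ("SIX", 0), ("SVN", 0), ("EGT", 0), ("NIN", 0)]
  -- num_dict[number] = num_dict[number] + 1  (the raising lookup num_dict[number] is ported via getD;
  -- exact on Pre_solution, where every word is a key of the dict and Python does not raise)
  let numDict := numbers.foldl (fun d number => d.insert number (d.getD number 0 + 1)) numDict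
  -- for k, v in num_dict.items(): if v != 0: for _ in range(v): new_numbers.append(k)
  let newNumbers := numDict.items.foldl (fun acc kv =>
    if kv.2 ≠ 0 then (PySem.List.pyRange 0 kv.2 1).foldl (fun acc _ => acc ++ [kv.1]) acc
    else acc) []
  PySem.Str.join " " newNumbers

-- ===== PORT B =====
def solution_alt (numbers : List String) : String :=
  let order : PySem.Dict String Int := PySem.Dict.ofList
    [("ZRO", 0), ("ONE", 1), ("TWO", 2), ("THR", 3), ("FOR", 4),
     ("FIV", 5), ("SIX", 6), ("SVN", 7), ("EGT", 8), ("NIN", 9)]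
  -- order[w] (raising lookup) is ported via getD; exact on Pre_solution, where every word is a key
  PySem.Str.join " " (PySem.List.sorted numbers (fun w => order.getD w 0) false)

-- ===== PRECONDITION & SPEC =====
-- the ten valid number words, in A's dict-insertion order
def pvTokens : List String :=
  ["ZRO", "ONE", "TWO", "THR", "FOR", "FIV", "SIX", "SVN", "EGT", "NIN"]

-- Pre_ excludes exactly the inputs containing a word outside the ten tokens, on which A raises KeyError.
def Pre_solution (numbers : List String) : Prop := ∀ w ∈ numbers, w ∈ pvTokens
instance (numbers : List String) : Decidable (Pre_solution numbers) := by unfold Pre_solution; infer_instance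

def pvWitness_solution : List String := ["ONE", "ZRO", "NIN", "ONE", "FIV"]

def Spec_solution (numbers : List String) (out : String) : Prop := out = solution_alt numbers
instance (numbers : List String) (out : String) : Decidable (Spec_solution numbers out) := by unfold Spec_solution; infer_instance

-- ===== CLAIM (what is proved, stated in full; the proofs are below) =====
def Claim_equal_solution : Prop := ∀ (numbers : List String), Dom_solution numbers → Pre_solution numbers → Spec_solution numbers (solution numbers)

-- ===== LEMMAS AND PROOFS =====

-- B's rank of a word
def pvRank (w : String) : Int :=
  (PySem.Dict.ofList
    [("ZRO", 0), ("ONE", 1), ("TWO", 2), ("THR", 3), ("FOR", 4),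
     ("FIV", 5), ("SIX", 6), ("SVN", 7), ("EGT", 8), ("NIN", 9)] : PySem.Dict String Int).getD w 0

-- the canonical output word list for a given count function
def pvCanon (c : String → Nat) : List String :=
  pvTokens.flatMap (fun k => List.replicate (c k) k)

lemma pv_insertBy_replicate (p : String → String → Bool) (x k : String) (n : Nat)
    (rest : List String) (h : p x k = false) :
    PySem.List.insertBy p x (List.replicate n k ++ rest)
      = List.replicate n k ++ PySem.List.insertBy p x rest := by
  induction n with
  | zero => simp
  | succ m ih => simp [List.replicate_succ, PySem.List.insertBy, h, ih]

lemma pv_insertBy_cons_of_all (p : String → String → Bool) (x : String) (l : List String)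
    (h : ∀ y ∈ l, p x y = true) :
    PySem.List.insertBy p x l = x :: l := by
  cases l with
  | nil => rfl
  | cons y ys => simp [PySem.List.insertBy, h y (by simp)]

-- inserting a valid word into a canonical list appends it to its own block
lemma pv_insert_canon (ks : List String) (c : String → Nat) (x : String)
    (hx : x ∈ ks) (hp : ks.Pairwise (fun a b => pvRank a < pvRank b)) :
    PySem.List.insertBy (fun a b => decide (pvRank a < pvRank b)) x
        (ks.flatMap (fun k => List.replicate (c k) k))
      = ks.flatMap (fun k => List.replicate (c k) k ++ if k = x then [x] else []) := by
  induction ks with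
  | nil => cases hx
  | cons k ks ih =>
    rcases List.pairwise_cons.mp hp with ⟨hk, hp'⟩
    by_cases hxk : x = k
    · subst hxk
      rw [List.flatMap_cons, pv_insertBy_replicate _ _ _ _ _ (by simp),
          pv_insertBy_cons_of_all]
      · have hne : ∀ k' ∈ ks, ¬ (k' = x) := by
          intro k' hk' he; subst he; exact absurd (hk k' hk') (lt_irrefl _)
        rw [List.flatMap_cons, if_pos rfl]
        have : ks.flatMap (fun k => List.replicate (c k) k ++ if k = x then [x] else [])
            = ks.flatMap (fun k => List.replicate (c k) k) := by
          apply List.flatMap_congr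
          intro a ha; rw [if_neg (hne a ha)]; simp
        rw [this]; simp
      · intro y hy
        rcases List.mem_flatMap.mp hy with ⟨k', hk', hy'⟩
        have : y = k' := List.eq_of_mem_replicate hy'
        subst this
        simpa using hk y hk'
    · have hx' : x ∈ ks := by cases hx with
        | head => exact absurd rfl hxk
        | tail _ h => exact h
      have hlt : pvRank k < pvRank x := hk x hx'
      rw [List.flatMap_cons, pv_insertBy_replicate _ _ _ _ _ (by simp; omega),
          ih hx' hp', List.flatMap_cons, if_neg (fun he => hxk he.symm)]
      simp

lemma pv_tokens_pairwise : pvTokens.Pairwise (fun a b => pvRank a < pvRank b) := by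
  decide

-- the insertion-sort fold maintains the canonical form
lemma pv_foldl_insertBy (xs : List String) :
    ∀ ys : List String, (∀ w ∈ xs, w ∈ pvTokens) →
    xs.foldl (fun acc x => PySem.List.insertBy (fun a b => decide (pvRank a < pvRank b)) x acc)
        (pvCanon (fun k => ys.count k))
      = pvCanon (fun k => (ys ++ xs).count k) := by
  induction xs with
  | nil => intro ys _; simp
  | cons x xs ih =>
    intro ys hmem
    rw [List.foldl_cons]
    have hstep : PySem.List.insertBy (fun a b => decide (pvRank a < pvRank b)) x
        (pvCanon (fun k => ys.count k)) = pvCanon (fun k => (ys ++ [x]).count k) := by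
      unfold pvCanon
      rw [pv_insert_canon pvTokens _ x (hmem x (by simp)) pv_tokens_pairwise]
      apply List.flatMap_congr
      intro k _
      by_cases hkx : k = x
      · subst hkx
        simp [List.count_append, List.replicate_succ']
      · simp [hkx, List.count_append, Ne.symm hkx]
    rw [hstep, ih (ys ++ [x]) (fun w hw => hmem w (by simp [hw]))]
    simp
lemma pv_sorted_canon (xs : List String) (h : ∀ w ∈ xs, w ∈ pvTokens) :
    PySem.List.sorted xs pvRank false = pvCanon (fun k => xs.count k) := by
  rw [PySem.List.sorted_eq_foldl_insertBy]
  have := pv_foldl_insertBy xs [] h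
  simpa [pvCanon] using this

-- A's counting loop leaves the key list unchanged when every word is already a key
lemma pv_foldl_insert_keys (xs : List String) :
    ∀ d : PySem.Dict String Int, (∀ w ∈ xs, w ∈ d.keys) →
    (xs.foldl (fun d number => d.insert number (d.getD number 0 + 1)) d).keys = d.keys := by
  induction xs with
  | nil => intro d _; rfl
  | cons x xs ih =>
    intro d hmem
    rw [List.foldl_cons]
    have hc : d.contains x = true :=
      (PySem.Dict.contains_iff_mem_keys d x).mpr (hmem x (by simp))
    have hk : (d.insert x (d.getD x 0 + 1)).keys = d.keys :=
      PySem.Dict.keys_insert_of_contains d _ hc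
    rw [ih _ (by intro w hw; rw [hk]; exact hmem w (by simp [hw])), hk]

-- the inner 'for _ in range(v): append(k)' loop, with its v != 0 guard, appends count copies of k
lemma pv_inner_loop (n : Nat) (k : String) (acc : List String) :
    (if ((n : Int) ≠ 0) then
        (PySem.List.pyRange 0 (n : Int) 1).foldl (fun acc _ => acc ++ [k]) acc
      else acc) = acc ++ List.replicate n k := by
  cases n with
  | zero => simp
  | succ m =>
    rw [if_pos (by exact_mod_cast Nat.succ_ne_zero m)]
    rw [PySem.List.pyRange_zero_natCast,
        PySem.List.foldl_append_eq_flatMap (fun _ => [k])]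
    congr 1
    rw [List.flatMap_map]
    induction (m + 1) with
    | zero => rfl
    | succ j ihj =>
      rw [List.range_succ, List.flatMap_append, ihj, List.replicate_succ']
      rfl

-- ===== VERDICT (by name: the statement is the Claim_ definition above) =====
theorem solution_spec : Claim_equal_solution := by
  intro numbers _ hpre
  show solution numbers = solution_alt numbers
  simp only [solution, solution_alt]
  congr 1
  have hsort : PySem.List.sorted numbers (fun w =>
      (PySem.Dict.ofList
        [("ZRO", 0), ("ONE", 1), ("TWO", 2), ("THR", 3), ("FOR", 4),
         ("FIV", 5), ("SIX", 6), ("SVN", 7), ("EGT", 8), ("NIN", 9)] : PySem.Dict String Int).getD w 0) false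
      = pvCanon (fun k => numbers.count k) := pv_sorted_canon numbers hpre
  rw [hsort]
  set dfin := numbers.foldl (fun d number => d.insert number (d.getD number 0 + 1))
    (PySem.Dict.ofList
      [("ZRO", 0), ("ONE", 0), ("TWO", 0), ("THR", 0), ("FOR", 0),
       ("FIV", 0), ("SIX", 0), ("SVN", 0), ("EGT", 0), ("NIN", 0)] : PySem.Dict String Int) with hdfin
  have hkeys : dfin.keys = pvTokens := by
    rw [hdfin]
    exact pv_foldl_insert_keys numbers
      (PySem.Dict.ofList
        [("ZRO", 0), ("ONE", 0), ("TWO", 0), ("THR", 0), ("FOR", 0),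
         ("FIV", 0), ("SIX", 0), ("SVN", 0), ("EGT", 0), ("NIN", 0)] : PySem.Dict String Int)
      (fun w hw => hpre w hw)
  have hgetD : ∀ k ∈ pvTokens, dfin.getD k 0 = (numbers.count k : Int) := by
    intro k hk
    rw [hdfin, PySem.Dict.getD_foldl_insert_add_one]
    have h0 : (PySem.Dict.ofList
        [("ZRO", (0 : Int)), ("ONE", 0), ("TWO", 0), ("THR", 0), ("FOR", 0),
         ("FIV", 0), ("SIX", 0), ("SVN", 0), ("EGT", 0), ("NIN", 0)]).getD k 0 = 0 := by
      fin_cases hk <;> decide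
    rw [h0, zero_add]
  rw [PySem.Dict.items_eq_map_keys dfin (by rw [hkeys]; decide) 0, hkeys]
  rw [List.foldl_map]
  dsimp only
  have hfold : List.foldl
      (fun x y => if dfin.getD y 0 ≠ 0 then
          List.foldl (fun acc _ => acc ++ [y]) x (PySem.List.pyRange 0 (dfin.getD y 0))
        else x) [] pvTokens
      = List.foldl (fun acc k => acc ++ List.replicate (numbers.count k) k) [] pvTokens := by
    apply PySem.List.foldl_congr_mem
    intro acc k hk
    simp only [hgetD k hk]
    exact pv_inner_loop (numbers.count k) k acc
  rw [hfold]
  rw [PySem.List.foldl_append_eq_flatMap (fun k => List.replicate (numbers.count k) k)]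
  rfl
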